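-- pv_equiv track=rewrite | github.com/LucaFratipietro/Showdown_Stats_Scrapper | DataScraper.py | get_player_and_nickname_from_line_segment
-- ===== SOURCE A (Python) =====
-- def get_player_and_nickname_from_line_segment(segment):
--
--     split_list = segment.split(': ')
--
--     if len(split_list) > 2:
--         # WHO NICKNAMES MONS WITH :
--         nickname = ''
--         for i in range(1, len(split_list)):
--             nickname += split_list[i]
--             if i != len(split_list) - 1:
--                 nickname += ':'
--         split_list[1] = nickname
--
--     #Nicknames have leading space for some reason -- remove it
--     split_list[1] = split_list[1].lstrip()
--
--     if "p1" in split_list[0]: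
--         split_list[0] = 'p1'
--     elif "p2" in split_list[0]:
--         split_list[0] = 'p2'
--
--     split_list_fixed = split_list[0:2]
--     return split_list_fixed[0], split_list_fixed[1]
-- ===== SOURCE B (Python) =====
-- def get_player_and_nickname_from_line_segment(segment):
--     parts = segment.split(': ', 1)
--     nickname = parts[1].replace(': ', ':').lstrip()
--     head = parts[0]
--     if 'p1' in head:
--         player = 'p1'
--     elif 'p2' in head:
--         player = 'p2'
--     else:
--         player = head
--     return player, nickname
-- ===== Notes on version B (the rewrite author's own statement) =====
-- stated objective: simpler
-- what changed: A's full split plus a conditional index loop that re-joins the pieces with ':' is replaced by one maxsplit-1 split and a single str.replace collapsing every remaining ': ' to ':'; no branch on the piece count and no index loop remain.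
import Mathlib
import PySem

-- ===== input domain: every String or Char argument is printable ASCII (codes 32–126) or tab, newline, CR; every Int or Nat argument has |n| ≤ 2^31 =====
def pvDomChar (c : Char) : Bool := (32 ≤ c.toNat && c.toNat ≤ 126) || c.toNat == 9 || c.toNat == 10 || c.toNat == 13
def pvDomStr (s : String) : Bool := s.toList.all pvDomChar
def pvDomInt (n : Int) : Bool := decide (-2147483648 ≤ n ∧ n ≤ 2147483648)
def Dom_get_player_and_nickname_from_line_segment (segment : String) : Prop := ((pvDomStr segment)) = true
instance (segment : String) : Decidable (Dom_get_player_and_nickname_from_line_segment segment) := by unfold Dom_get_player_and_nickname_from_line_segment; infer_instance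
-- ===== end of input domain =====

-- B replaces A's full split + conditional re-join index loop by one maxsplit-1 split and a
-- single str.replace collapsing the remaining ': ' occurrences; objective: simpler.

-- ===== PORT A =====
def get_player_and_nickname_from_line_segment (segment : String) : String × String :=
  let split_list := PySem.Chars.splitOn segment.toList [':', ' ']
  let split_list :=
    if 2 < split_list.length then
      -- WHO NICKNAMES MONS WITH :
      let nickname := (PySem.List.pyRange 1 (split_list.length : Int) 1).foldl
        (fun nick i =>
          let nick := nick ++ PySem.List.pyGetD split_list i []
          if i ≠ (split_list.length : Int) - 1 then nick ++ [':'] else nick) []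
      split_list.set 1 nickname
    else split_list
  -- split_list[1].lstrip(); reading split_list[1] raises IndexError when no ': ' occurs
  -- (that is outside Pre_); pyGetD's default [] stands for the absent element there.
  let split_list := split_list.set 1 (PySem.Chars.lstrip (PySem.List.pyGetD split_list 1 []))
  let split_list :=
    if PySem.Chars.isIn ['p', '1'] (PySem.List.pyGetD split_list 0 []) then split_list.set 0 ['p', '1']
    else if PySem.Chars.isIn ['p', '2'] (PySem.List.pyGetD split_list 0 []) then split_list.set 0 ['p', '2']
    else split_list
  let split_list_fixed := PySem.List.slice split_list (some 0) (some 2)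
  (String.ofList (PySem.List.pyGetD split_list_fixed 0 []),
   String.ofList (PySem.List.pyGetD split_list_fixed 1 []))

-- ===== PORT B =====
def get_player_and_nickname_from_line_segment_alt (segment : String) : String × String :=
  let parts := PySem.Chars.splitOnMax segment.toList [':', ' '] 1
  -- parts[1] raises IndexError when no ': ' occurs (outside Pre_); pyGetD's default [] stands in.
  let nickname := PySem.Chars.lstrip (PySem.Chars.replace (PySem.List.pyGetD parts 1 []) [':', ' '] [':'])
  let head := PySem.List.pyGetD parts 0 []
  let player :=
    if PySem.Chars.isIn ['p', '1'] head then ['p', '1']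
    else if PySem.Chars.isIn ['p', '2'] head then ['p', '2']
    else head
  (String.ofList player, String.ofList nickname)

-- ===== PRECONDITION & SPEC =====
-- Pre_ excludes exactly the segments with no ': ' occurrence: there Python A raises IndexError
-- on split_list[1] (and Python B raises IndexError on parts[1] as well).
def Pre_get_player_and_nickname_from_line_segment (segment : String) : Prop :=
  PySem.Str.isIn ": " segment = true
instance (segment : String) : Decidable (Pre_get_player_and_nickname_from_line_segment segment) := by
  unfold Pre_get_player_and_nickname_from_line_segment; infer_instance

def pvWitness_get_player_and_nickname_from_line_segment : String := "p1a: Pika"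

def Spec_get_player_and_nickname_from_line_segment (segment : String) (out : String × String) : Prop :=
  out = get_player_and_nickname_from_line_segment_alt segment
instance (segment : String) (out : String × String) : Decidable (Spec_get_player_and_nickname_from_line_segment segment out) := by
  unfold Spec_get_player_and_nickname_from_line_segment; infer_instance

-- ===== CLAIM (what is proved, stated in full; the proofs are below) =====
def Claim_equal_get_player_and_nickname_from_line_segment : Prop :=
  ∀ (segment : String), Dom_get_player_and_nickname_from_line_segment segment →
    Pre_get_player_and_nickname_from_line_segment segment →
    Spec_get_player_and_nickname_from_line_segment segment (get_player_and_nickname_from_line_segment segment)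

-- ===== LEMMAS AND PROOFS =====

-- splitOn.go: the outer accumulator is prepended reversed
theorem pv_split_go_acc (fuel : Nat) (l cur : List Char) (acc : List (List Char)) :
    PySem.Chars.splitOn.go [':', ' '] fuel l cur acc
      = acc.reverse ++ PySem.Chars.splitOn.go [':', ' '] fuel l cur [] := by
  induction fuel generalizing l cur acc with
  | zero => rw [PySem.Chars.splitOn.go, PySem.Chars.splitOn.go]; simp
  | succ fuel ih =>
    cases l with
    | nil => rw [PySem.Chars.splitOn.go, PySem.Chars.splitOn.go] <;> simp
    | cons c rest =>
      rw [PySem.Chars.splitOn.go, PySem.Chars.splitOn.go]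
      by_cases hp : [':', ' '].isPrefixOf (c :: rest) = true
      · rw [if_pos hp, if_pos hp, ih, ih (acc := [cur.reverse])]
        simp
      · rw [if_neg hp, if_neg hp, ih]

-- replace.go: the accumulator is prepended reversed
theorem pv_replace_go_acc (fuel : Nat) (l acc : List Char) :
    PySem.Chars.replace.go [':', ' '] [':'] fuel l acc
      = acc.reverse ++ PySem.Chars.replace.go [':', ' '] [':'] fuel l [] := by
  induction fuel generalizing l acc with
  | zero => rw [PySem.Chars.replace.go, PySem.Chars.replace.go]; simp
  | succ fuel ih =>
    cases l with
    | nil => rw [PySem.Chars.replace.go, PySem.Chars.replace.go] <;> simp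
    | cons c rest =>
      rw [PySem.Chars.replace.go, PySem.Chars.replace.go]
      by_cases hp : [':', ' '].isPrefixOf (c :: rest) = true
      · rw [if_pos hp, if_pos hp, ih, ih (acc := [':'].reverse ++ [])]
        simp
      · rw [if_neg hp, if_neg hp, ih, ih (acc := [c])]
        simp

-- splitOn.go always yields at least one piece
theorem pv_split_go_ne_nil (fuel : Nat) (l cur : List Char) :
    PySem.Chars.splitOn.go [':', ' '] fuel l cur [] ≠ [] := by
  induction fuel generalizing l cur with
  | zero => rw [PySem.Chars.splitOn.go]; simp
  | succ fuel ih =>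
    cases l with
    | nil => rw [PySem.Chars.splitOn.go] <;> simp
    | cons c rest =>
      rw [PySem.Chars.splitOn.go]
      by_cases hp : [':', ' '].isPrefixOf (c :: rest) = true
      · rw [if_pos hp, pv_split_go_acc]; simp
      · rw [if_neg hp]; exact ih _ _

theorem pv_ic_singleton (x : List Char) : [':'].intercalate [x] = x := by
  simp [List.intercalate]

theorem pv_ic_cons (a : List Char) (xs : List (List Char)) (h : xs ≠ []) :
    [':'].intercalate (a :: xs) = a ++ ':' :: [':'].intercalate xs := by
  obtain ⟨y, ys, rfl⟩ := List.exists_cons_of_ne_nil h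
  simp [List.intercalate]

theorem pv_ic_modifyHead (p : List Char) (L : List (List Char)) (h : L ≠ []) :
    [':'].intercalate (L.modifyHead (p ++ ·)) = p ++ [':'].intercalate L := by
  obtain ⟨y, ys, rfl⟩ := List.exists_cons_of_ne_nil h
  rcases ys with _ | ⟨z, zs⟩
  · simp [pv_ic_singleton]
  · rw [List.modifyHead_cons, pv_ic_cons (p ++ y) (z :: zs) (by simp), pv_ic_cons y (z :: zs) (by simp)]
    simp

-- splitOn.go: the current-piece accumulator only prefixes the first piece
theorem pv_split_go_cur (fuel : Nat) (l cur : List Char) :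
    PySem.Chars.splitOn.go [':', ' '] fuel l cur []
      = (PySem.Chars.splitOn.go [':', ' '] fuel l [] []).modifyHead (cur.reverse ++ ·) := by
  induction fuel generalizing l cur with
  | zero => rw [PySem.Chars.splitOn.go, PySem.Chars.splitOn.go]; simp
  | succ fuel ih =>
    cases l with
    | nil => rw [PySem.Chars.splitOn.go, PySem.Chars.splitOn.go] <;> simp
    | cons c rest =>
      rw [PySem.Chars.splitOn.go, PySem.Chars.splitOn.go]
      by_cases hp : [':', ' '].isPrefixOf (c :: rest) = true
      · rw [if_pos hp, if_pos hp, pv_split_go_acc, pv_split_go_acc (acc := [List.reverse []])]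
        simp
      · rw [if_neg hp, if_neg hp, ih, ih (cur := [c])]
        obtain ⟨h0, t0, hsh⟩ := List.exists_cons_of_ne_nil (pv_split_go_ne_nil fuel rest [])
        rw [hsh]
        simp

-- splitOn.go ignores fuel beyond the string length
theorem pv_split_go_succ (fuel : Nat) (l cur : List Char) (acc : List (List Char))
    (h : l.length ≤ fuel) :
    PySem.Chars.splitOn.go [':', ' '] (fuel + 1) l cur acc
      = PySem.Chars.splitOn.go [':', ' '] fuel l cur acc := by
  induction fuel generalizing l cur acc with
  | zero =>
    interval_cases hl : l.length
    · rw [List.length_eq_zero_iff] at hl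
      subst hl
      rw [PySem.Chars.splitOn.go, PySem.Chars.splitOn.go] <;> simp
  | succ fuel ih =>
    cases l with
    | nil => rw [PySem.Chars.splitOn.go, PySem.Chars.splitOn.go] <;> simp
    | cons c rest =>
      rw [PySem.Chars.splitOn.go, PySem.Chars.splitOn.go]
      by_cases hp : [':', ' '].isPrefixOf (c :: rest) = true
      · rw [if_pos hp, if_pos hp]
        have hlen : 2 ≤ (c :: rest).length :=
          List.IsPrefix.length_le (List.isPrefixOf_iff_prefix.mp hp)
        exact ih _ _ _ (by simp at h hlen ⊢; omega)
      · rw [if_neg hp, if_neg hp]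
        exact ih _ _ _ (by simp at h ⊢; omega)

theorem pv_split_go_irrel (f1 f2 : Nat) (l cur : List Char) (acc : List (List Char))
    (h1 : l.length ≤ f1) (h2 : l.length ≤ f2) :
    PySem.Chars.splitOn.go [':', ' '] f1 l cur acc
      = PySem.Chars.splitOn.go [':', ' '] f2 l cur acc := by
  have aux : ∀ d (l cur : List Char) (acc : List (List Char)),
      PySem.Chars.splitOn.go [':', ' '] (l.length + d) l cur acc
        = PySem.Chars.splitOn.go [':', ' '] l.length l cur acc := by
    intro d
    induction d with
    | zero => intro l cur acc; rfl
    | succ d ih =>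
      intro l cur acc
      have : l.length + (d + 1) = (l.length + d) + 1 := by omega
      rw [this, pv_split_go_succ _ _ _ _ (by omega), ih]
  obtain ⟨d1, rfl⟩ : ∃ d, f1 = l.length + d := ⟨f1 - l.length, by omega⟩
  obtain ⟨d2, rfl⟩ : ∃ d, f2 = l.length + d := ⟨f2 - l.length, by omega⟩
  rw [aux, aux]

-- replace with ':' is the ':'-join of the split pieces
theorem pv_replace_eq_join (fuel : Nat) (l : List Char) (h : l.length ≤ fuel) :
    PySem.Chars.replace.go [':', ' '] [':'] fuel l []
      = [':'].intercalate (PySem.Chars.splitOn.go [':', ' '] fuel l [] []) := by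
  induction fuel generalizing l with
  | zero =>
    have : l = [] := by simpa using h
    subst this
    rw [PySem.Chars.replace.go, PySem.Chars.splitOn.go]
    simp [List.intercalate]
  | succ fuel ih =>
    cases l with
    | nil =>
      rw [PySem.Chars.replace.go, PySem.Chars.splitOn.go] <;> simp [List.intercalate]
    | cons c rest =>
      rw [PySem.Chars.replace.go, PySem.Chars.splitOn.go]
      by_cases hp : [':', ' '].isPrefixOf (c :: rest) = true
      · rw [if_pos hp, if_pos hp, pv_replace_go_acc, pv_split_go_acc]
        have hlen : 2 ≤ (c :: rest).length :=
          List.IsPrefix.length_le (List.isPrefixOf_iff_prefix.mp hp)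
        rw [ih _ (by simp at h hlen ⊢; omega)]
        simp only [List.reverse_nil, List.reverse_cons, List.nil_append, List.append_nil,
          List.singleton_append]
        rw [pv_ic_cons _ _ (pv_split_go_ne_nil _ _ _)]
        simp
      · rw [if_neg hp, if_neg hp, pv_replace_go_acc, pv_split_go_cur]
        rw [ih _ (by simp at h ⊢; omega)]
        rw [pv_ic_modifyHead _ _ (pv_split_go_ne_nil _ _ _)]

-- splitOnMax.go with exhausted budget returns the remainder as one piece
theorem pv_msplit_go_zero (fuel : Nat) (l cur : List Char) (acc : List (List Char)) :
    PySem.Chars.splitOnMax.go [':', ' '] fuel 0 l cur acc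
      = acc.reverse ++ [cur.reverse ++ l] := by
  cases fuel with
  | zero => rw [PySem.Chars.splitOnMax.go]; simp
  | succ fuel =>
    cases l with
    | nil => rw [PySem.Chars.splitOnMax.go] <;> simp
    | cons c rest =>
      rw [PySem.Chars.splitOnMax.go]
      rw [if_pos rfl]
      simp

-- maxsplit-1 split vs full split: either no separator (one piece each), or the full split
-- is the first piece followed by the full split of the raw remainder
theorem pv_msplit_one (fuel : Nat) (l cur : List Char) (h : l.length ≤ fuel) :
    (PySem.Chars.splitOnMax.go [':', ' '] fuel 1 l cur [] = [cur.reverse ++ l]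
      ∧ PySem.Chars.splitOn.go [':', ' '] fuel l cur [] = [cur.reverse ++ l])
    ∨ (∃ first r, PySem.Chars.splitOnMax.go [':', ' '] fuel 1 l cur [] = [first, r]
        ∧ PySem.Chars.splitOn.go [':', ' '] fuel l cur []
            = first :: PySem.Chars.splitOn.go [':', ' '] r.length r [] []) := by
  induction fuel generalizing l cur with
  | zero =>
    left
    rw [PySem.Chars.splitOnMax.go, PySem.Chars.splitOn.go]
    simp
  | succ fuel ih =>
    cases l with
    | nil =>
      left
      rw [PySem.Chars.splitOnMax.go, PySem.Chars.splitOn.go] <;> simp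
    | cons c rest =>
      rw [PySem.Chars.splitOnMax.go, PySem.Chars.splitOn.go]
      rw [if_neg (by decide : ¬ (1 = 0))]
      by_cases hp : [':', ' '].isPrefixOf (c :: rest) = true
      · right
        have hlen : 2 ≤ (c :: rest).length :=
          List.IsPrefix.length_le (List.isPrefixOf_iff_prefix.mp hp)
        refine ⟨cur.reverse, List.drop [':', ' '].length (c :: rest), ?_, ?_⟩
        · rw [if_pos hp, pv_msplit_go_zero]
          simp
        · rw [if_pos hp, pv_split_go_acc,
            pv_split_go_irrel fuel (List.drop [':', ' '].length (c :: rest)).length _ _ _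
              (by simp at h hlen ⊢; omega) (by omega)]
          simp
      · rw [if_neg hp, if_neg hp]
        have := ih rest (c :: cur) (by simp at h ⊢; omega)
        simpa using this

-- A's re-join loop computes the ':'-join of the pieces after the first
theorem pv_loop_join (l : List (List Char)) (k : Nat) (acc : List Char)
    (h1 : 1 ≤ k) (h2 : k < l.length) :
    (PySem.List.pyRange (k : Int) (l.length : Int) 1).foldl
      (fun nick i =>
        let nick := nick ++ PySem.List.pyGetD l i []
        if i ≠ (l.length : Int) - 1 then nick ++ [':'] else nick) acc
      = acc ++ [':'].intercalate (l.drop k) := by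
  obtain ⟨d, hd⟩ : ∃ d, l.length - (k + 1) = d := ⟨_, rfl⟩
  induction d generalizing k acc with
  | zero =>
    -- k is the last index
    have hk : k = l.length - 1 := by omega
    rw [PySem.List.pyRange_one_cons (by exact_mod_cast h2)]
    rw [show ((k : Int) + 1) = ((l.length : Nat) : Int) by omega]
    rw [PySem.List.pyRange_of_pos _ _ (by norm_num : (0:Int) < 1)]
    simp only [lt_irrefl, if_false, List.range_zero, List.map_nil, List.foldl_cons,
      List.foldl_nil]
    rw [PySem.List.pyGetD_natCast]
    rw [if_neg (by omega : ¬ ((k : Int) ≠ (l.length : Int) - 1))]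
    rw [List.drop_eq_getElem_cons h2]
    rw [show k + 1 = l.length by omega, List.drop_length]
    rw [pv_ic_singleton, List.getD_eq_getElem l [] h2]
  | succ d ih =>
    rw [PySem.List.pyRange_one_cons (by exact_mod_cast h2)]
    rw [List.foldl_cons]
    simp only
    rw [PySem.List.pyGetD_natCast]
    rw [if_pos (by omega : ((k : Int) ≠ (l.length : Int) - 1))]
    rw [show ((k : Int) + 1) = (((k + 1 : Nat)) : Int) by push_cast; ring]
    rw [ih (k + 1) _ (by omega) (by omega) (by omega)]
    rw [List.drop_eq_getElem_cons h2]
    rw [pv_ic_cons _ _ (by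
      have : l.length - (k + 1) ≠ 0 := by omega
      simp [List.drop_eq_nil_iff]
      omega)]
    rw [List.getD_eq_getElem l [] h2]
    simp

-- ===== VERDICT (by name: the statement is the Claim_ definition above) =====
theorem get_player_and_nickname_from_line_segment_spec : Claim_equal_get_player_and_nickname_from_line_segment := by
  intro segment _hdom _hpre
  unfold Spec_get_player_and_nickname_from_line_segment
  unfold get_player_and_nickname_from_line_segment get_player_and_nickname_from_line_segment_alt
  generalize segment.toList = cs
  rw [show PySem.Chars.splitOn cs [':', ' ']
        = PySem.Chars.splitOn.go [':', ' '] (cs.length + 1) cs [] [] from rfl,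
      show PySem.Chars.splitOnMax cs [':', ' '] 1
        = PySem.Chars.splitOnMax.go [':', ' '] (cs.length + 1) 1 cs [] [] from rfl]
  rcases pv_msplit_one (cs.length + 1) cs [] (by omega)
    with ⟨hm, hs⟩ | ⟨first, r, hm, hs⟩
  · simp only [List.reverse_nil, List.nil_append] at hm hs
    rw [hm, hs]
    simp [PySem.List.pyGetD_ofNat', PySem.List.slice,
      show PySem.Chars.replace [] [':', ' '] [':'] = [] from rfl]
    split_ifs <;> simp [show PySem.Chars.lstrip [] = [] from rfl]
  · rw [hm, hs]
    obtain ⟨h0, t0, hR⟩ := List.exists_cons_of_ne_nil (pv_split_go_ne_nil r.length r [])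
    have hrep : PySem.Chars.replace r [':', ' '] [':'] = [':'].intercalate (h0 :: t0) := by
      rw [show PySem.Chars.replace r [':', ' '] [':']
            = PySem.Chars.replace.go [':', ' '] [':'] r.length r [] from rfl,
          pv_replace_eq_join r.length r le_rfl, hR]
    rw [hR]
    rcases t0 with _ | ⟨c1, t1⟩
    · rw [pv_ic_singleton] at hrep
      simp [hrep, PySem.List.pyGetD_ofNat', PySem.List.slice]
      split_ifs <;> simp
    · have hl := pv_loop_join (first :: h0 :: c1 :: t1) 1 [] le_rfl (by simp)
      simp only [Nat.cast_one, List.nil_append, List.drop_one, List.tail_cons] at hl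
      simp at hl
      simp [hrep, hl, PySem.List.pyGetD_ofNat', PySem.List.slice]
      split_ifs <;> simp
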